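-- pv_equiv track=rewrite | github.com/pypi-data/pypi-mirror-396 | packages/MEROAI/meroai-0.2.1-py3-none-any.whl/MEROAI/meroai/core.py | _count_parens_outside_strings
-- ===== SOURCE A (Python) =====
-- def _count_parens_outside_strings(line: str) -> tuple:
--     open_count = 0
--     close_count = 0
--     in_string = False
--     string_char = None
--     i = 0
--     while i < len(line):
--         char = line[i]
--         if in_string:
--             if char == '\\' and i + 1 < len(line):
--                 i += 2
--                 continue
--             if char == string_char:
--                 in_string = False
--                 string_char = None
--         else:
--             if char in '"\'':
--                 in_string = True
--                 string_char = char
--             elif char == '(':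
--                 open_count += 1
--             elif char == ')':
--                 close_count += 1
--         i += 1
--     return open_count, close_count
-- ===== SOURCE B (Python) =====
-- def _strip_strings(s):
--     """Return the characters of s that lie outside string literals."""
--     out = []
--     i = 0
--     n = len(s)
--     while i < n:
--         c = s[i]
--         if c in '"\'':
--             i += 1
--             while i < n:
--                 if s[i] == '\\' and i + 1 < n:
--                     i += 2
--                 elif s[i] == c:
--                     i += 1
--                     break
--                 else:
--                     i += 1
--         else:
--             out.append(c)
--             i += 1
--     return ''.join(out)
--
--
-- def _count_parens_outside_strings(line: str) -> tuple:
--     stripped = _strip_strings(line)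
--     return stripped.count('('), stripped.count(')')
-- ===== Notes on version B (the rewrite author's own statement) =====
-- stated objective: idiomatic
-- what changed: A counts parens in one pass with an in_string/string_char state machine and two counters; B first strips string literals out of the line (outer loop copying text, inner loop skipping a literal), then counts open and close parens in the stripped text with str.count.
import Mathlib
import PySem

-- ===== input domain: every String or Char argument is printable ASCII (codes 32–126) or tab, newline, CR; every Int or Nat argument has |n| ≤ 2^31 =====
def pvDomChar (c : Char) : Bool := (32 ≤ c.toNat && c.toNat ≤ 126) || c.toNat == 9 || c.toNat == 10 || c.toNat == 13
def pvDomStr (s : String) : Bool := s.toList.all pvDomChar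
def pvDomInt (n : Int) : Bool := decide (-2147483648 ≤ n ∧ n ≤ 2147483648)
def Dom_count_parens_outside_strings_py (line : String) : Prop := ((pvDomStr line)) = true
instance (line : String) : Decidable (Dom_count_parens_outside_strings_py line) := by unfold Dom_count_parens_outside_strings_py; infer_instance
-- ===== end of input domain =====

-- B replaces A's single-pass counter state machine by a two-phase decomposition:
-- first strip the string literals out of the line, then count '(' and ')' in the
-- leftover text with str.count (objective: simpler/idiomatic; return value only).

-- ===== PORT A =====
-- A's while loop over the index i, as structural recursion on the remaining
-- characters; state (open_count, close_count, in_string, string_char).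
def pvLoopA : List Char → Int → Int → Bool → Option Char → Int × Int
  | [], o, c, _, _ => (o, c)
  | ch :: rest, o, c, inStr, sc =>
    if inStr then
      if ch = '\\' ∧ rest ≠ [] then pvLoopA rest.tail o c inStr sc   -- i += 2; continue
      else if some ch = sc then pvLoopA rest o c false none
      else pvLoopA rest o c inStr sc
    else
      if ch = '"' ∨ ch = '\'' then pvLoopA rest o c true (some ch)
      else if ch = '(' then pvLoopA rest (o + 1) c inStr sc
      else if ch = ')' then pvLoopA rest o (c + 1) inStr sc
      else pvLoopA rest o c inStr sc
termination_by l => l.length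
decreasing_by all_goals (simp [List.length_tail]; try omega)

def count_parens_outside_strings_py (line : String) : Int × Int :=
  pvLoopA line.toList 0 0 false none

-- ===== PORT B =====
-- B's inner while loop: skip past one string literal opened by quote q,
-- returning the characters after its closing quote.
def pvSkipStr (q : Char) : List Char → List Char
  | [] => []
  | ch :: rest =>
    if ch = '\\' ∧ rest ≠ [] then pvSkipStr q rest.tail
    else if ch = q then rest
    else pvSkipStr q rest
termination_by l => l.length
decreasing_by all_goals (simp [List.length_tail]; try omega)

theorem pvSkipStr_length (q : Char) (l : List Char) : (pvSkipStr q l).length ≤ l.length := by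
  induction l using pvSkipStr.induct q with
  | case1 => simp [pvSkipStr]
  | case2 ch rest h ih =>
    rw [pvSkipStr, if_pos h]
    calc (pvSkipStr q rest.tail).length ≤ rest.tail.length := ih
      _ ≤ rest.length + 1 := by simp [List.length_tail]; omega
  | case3 rest h => rw [pvSkipStr, if_neg h]; simp
  | case4 ch rest h1 h2 ih =>
    rw [pvSkipStr, if_neg h1, if_neg h2]
    calc (pvSkipStr q rest).length ≤ rest.length := ih
      _ ≤ rest.length + 1 := by omega

-- B's outer while loop: collect the characters outside string literals.
def pvStrip : List Char → List Char
  | [] => []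
  | ch :: rest =>
    if ch = '"' ∨ ch = '\'' then pvStrip (pvSkipStr ch rest)
    else ch :: pvStrip rest
termination_by l => l.length
decreasing_by
  · exact Nat.lt_succ_of_le (pvSkipStr_length _ _)
  · simp

def count_parens_outside_strings_py_alt (line : String) : Int × Int :=
  let stripped := String.ofList (pvStrip line.toList)
  ((PySem.Str.count stripped "(" : Int), (PySem.Str.count stripped ")" : Int))

-- ===== PRECONDITION & SPEC =====
def Spec_count_parens_outside_strings_py (line : String) (out : Int × Int) : Prop := out = count_parens_outside_strings_py_alt line
instance (line : String) (out : Int × Int) : Decidable (Spec_count_parens_outside_strings_py line out) := by unfold Spec_count_parens_outside_strings_py; infer_instance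

-- ===== CLAIM (what is proved, stated in full; the proofs are below) =====
def Claim_equal_count_parens_outside_strings_py : Prop := ∀ (line : String), Dom_count_parens_outside_strings_py line → Spec_count_parens_outside_strings_py line (count_parens_outside_strings_py line)

-- ===== LEMMAS AND PROOFS =====

-- Python's str.count for a single-character needle is List.count.
theorem chars_count_go_singleton (c : Char) (l : List Char) :
    ∀ acc : Nat, PySem.Chars.count.go [c] l.length l acc = acc + l.count c := by
  induction l with
  | nil => intro acc; simp [PySem.Chars.count.go]
  | cons h t ih =>
    intro acc
    rw [List.length_cons, PySem.Chars.count.go]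
    by_cases hc : c = h
    · subst hc
      simp [List.isPrefixOf, ih]
      omega
    · simp [List.isPrefixOf, hc, Ne.symm hc, ih]

theorem chars_count_singleton (l : List Char) (c : Char) :
    PySem.Chars.count l [c] = l.count c := by
  have := chars_count_go_singleton c l 0
  simpa [PySem.Chars.count] using this

-- Inside a string literal, A's loop behaves like B's pvSkipStr.
theorem pvLoopA_inString (q : Char) (l : List Char) :
    ∀ o c : Int, pvLoopA l o c true (some q) = pvLoopA (pvSkipStr q l) o c false none := by
  induction l using pvSkipStr.induct q with
  | case1 => intro o c; rw [pvSkipStr]; simp [pvLoopA]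
  | case2 ch rest h ih =>
    intro o c
    simp [pvLoopA, pvSkipStr, h, ih]
  | case3 rest h =>
    intro o c
    simp [pvLoopA, pvSkipStr, h]
  | case4 ch rest h1 h2 ih =>
    intro o c
    simp [pvLoopA, pvSkipStr, h1, h2, ih]

-- Outside a string literal, A's loop counts exactly the parens of pvStrip.
theorem pvLoopA_eq_strip (l : List Char) :
    ∀ o c : Int, pvLoopA l o c false none =
      (o + ((pvStrip l).count '(' : Int), c + ((pvStrip l).count ')' : Int)) := by
  induction l using pvStrip.induct with
  | case1 => intro o c; simp [pvLoopA, pvStrip]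
  | case2 ch rest h ih =>
    intro o c
    simp only [pvLoopA, pvStrip, if_pos h, Bool.false_eq_true, if_false]
    rw [pvLoopA_inString, ih]
  | case3 ch rest h ih =>
    intro o c
    by_cases hop : ch = '('
    · subst hop
      simp [pvLoopA, pvStrip, ih, Prod.ext_iff]
      omega
    · by_cases hcl : ch = ')'
      · subst hcl
        simp [pvLoopA, pvStrip, ih, Prod.ext_iff]
        omega
      · simp [pvLoopA, pvStrip, h, hop, hcl, ih]


-- ===== VERDICT (by name: the statement is the Claim_ definition above) =====
theorem count_parens_outside_strings_py_spec : Claim_equal_count_parens_outside_strings_py := by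
  intro line _
  unfold Spec_count_parens_outside_strings_py count_parens_outside_strings_py count_parens_outside_strings_py_alt
  rw [pvLoopA_eq_strip]
  simp [PySem.Str.count_eq, chars_count_singleton]
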